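-- pv_equiv track=rewrite | github.com/MichaelWehar/FourCornersProblem | python/primary_implementation_case_1011.py | lemma2Exists
-- ===== SOURCE A (Python) =====
-- def createNextRightMap(m, n, matrix):
--     nextOneRight = [None for _ in range(m * n)]
--     for i in range(m):
--         # fact: before a row is traversed, no 1s have been found yet
--         foundOneYet = False
--         # fact: before a row is traversed, because no 1s have been found yet,
--         # the index of the previous 1 found is NULL
--         prevEntry = [None, None]
--         # for each element of a row:
--         for j in range(n):
--             nextOneRight[i * n + j] = -1
--             # if a 1 is encountered in row i:
--             if matrix[i][j] == True:
--                 # if a 1 has previously been encountered in row i: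
--                 if foundOneYet:
--                     # recall the stored index of the previous 1
--                     prevRowIndex = prevEntry[0]
--                     prevColIndex = prevEntry[1]
--                     # map the index of the current 1 to the index of the previous 1
--                     nextOneRight[prevRowIndex * n + prevColIndex] = j
--                     # store the index of the current 1
--                     prevEntry = [i, j]
--                 # if the current 1 is the first to be detected during a traversal:
--                 else:
--                     # note that a 1 has previously been encountered in row i
--                     foundOneYet = True
--                     # store the index of the current 1
--                     prevEntry = [i, j]
--     return nextOneRight
--
-- def createNextDownMap(m, n, matrix):
--     nextOneDown = [None for _ in range(m * n)]
--     for j in range(n):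
--         # fact: before a column is traversed, no 1s have been found yet
--         foundOneYet = False
--         # fact: before a column is traversed, because no 1s have been found yet,
--         # the index of the previous 1 found is NULL
--         prevEntry = [None, None]
--         # for each element of a column:
--         for i in range(m):
--             nextOneDown[i * n + j] = -1
--             # if a 1 is encountered in column i:
--             if matrix[i][j] == True:
--                 # if a 1 has previously been encountered in column i:
--                 if foundOneYet:
--                     # recall the stored index of the previous 1
--                     prevRowIndex = prevEntry[0]
--                     prevColIndex = prevEntry[1]
--                     # map the index of the current 1 to the index of the previous 1
--                     nextOneDown[prevRowIndex * n + prevColIndex] = i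
--                     # store the index of the current 1
--                     prevEntry = [i, j]
--                 # if the current 1 is the first to be detected during a traversal:
--                 else:
--                     # note that a 1 has previously been encountered in column i
--                     foundOneYet = True
--                     # store the index of the current 1
--                     prevEntry = [i, j]
--     return nextOneDown
--
-- def lemma2Exists(m, n, matrix):
--
--     # Map any location of a 1 such as (i, j) to the next location of a 1
--     # to the right or down
--     nextOneRight = createNextRightMap(m, n, matrix)
--     nextOneDown = createNextDownMap(m, n, matrix)
--
--     # Traverse through the matrix row by row
--     for topRow in range(m):
--         for leftCol in range(n):
--             # First, traverse through the current row's elements to find all 1's (or true entries)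
--             # 1's found here constitute the top left corner of a possible submatrix
--             if matrix[topRow][leftCol] == True:
--                 # Next, recall the index of the closest true entry below the upper left corner, if one exists
--                 # 1's found here constitute the bottom left corner of a possible submatrix
--                 bottomRow = nextOneDown[topRow * n + leftCol]
--                 if bottomRow != -1 and matrix[bottomRow][leftCol] == True:
--                     # Next, recall the index of the closest true entry to the right of the bottom left corner, if one exists
--                     # 1's found here constitute the bottom right corner of a possible submatrix
--                     rightCol = nextOneRight[bottomRow * n + leftCol]
--                     if rightCol != -1 and matrix[bottomRow][rightCol] == True and matrix[topRow][rightCol] == False: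
--                         # Finally, check that the top right corner of the submatrix defined by the other three indices at which
--                         # 1's were found is 0 (or false)
--                         return True
--     return False
-- ===== SOURCE B (Python) =====
-- def lemma2Exists(m, n, matrix):
--     # Direct nearest-below / nearest-right scanning; no precomputed jump tables.
--     for topRow in range(m):
--         for leftCol in range(n):
--             if matrix[topRow][leftCol] == True:
--                 bottomRow = next((i for i in range(topRow + 1, m)
--                                   if matrix[i][leftCol] == True), None)
--                 if bottomRow is None:
--                     continue
--                 rightCol = next((c for c in range(leftCol + 1, n)
--                                  if matrix[bottomRow][c] == True), None)
--                 if rightCol is None: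
--                     continue
--                 if matrix[topRow][rightCol] == False:
--                     return True
--     return False
-- ===== Notes on version B (the rewrite author's own statement) =====
-- stated objective: simpler
-- what changed: Replaced the two O(mn) precomputed jump tables (nextOneRight/nextOneDown index arrays built by stateful passes) with direct on-demand scans: for each True top-left cell, scan down for the first True below and then right for the first True in that row, checking the top-right corner.
import Mathlib
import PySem

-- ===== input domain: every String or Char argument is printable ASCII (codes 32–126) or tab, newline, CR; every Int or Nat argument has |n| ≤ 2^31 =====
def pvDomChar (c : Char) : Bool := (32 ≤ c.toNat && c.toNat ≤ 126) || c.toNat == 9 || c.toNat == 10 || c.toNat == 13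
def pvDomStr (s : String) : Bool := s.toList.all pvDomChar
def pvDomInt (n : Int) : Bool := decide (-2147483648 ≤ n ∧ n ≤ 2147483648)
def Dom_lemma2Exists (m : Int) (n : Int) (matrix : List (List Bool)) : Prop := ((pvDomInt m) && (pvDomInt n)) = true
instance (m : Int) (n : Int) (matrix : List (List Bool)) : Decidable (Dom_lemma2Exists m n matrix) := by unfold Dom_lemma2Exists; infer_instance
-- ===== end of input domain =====

-- B replaces A's two precomputed nearest-one jump tables by direct nearest-below / nearest-right
-- scans from each candidate corner (simpler; same return value, no speed claim).

-- shared matrix read helper: matrix[i][j] (always in bounds on inputs admitted by Pre_)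
def pvCell (matrix : List (List Bool)) (i j : Nat) : Bool := (matrix.getD i []).getD j false

-- ===== PORT A =====
def pvRightStep (matrix : List (List Bool)) (N i : Nat)
    (st : List (Option Int) × Bool × Nat × Nat) (j : Nat) :
    List (Option Int) × Bool × Nat × Nat :=
  let arr := st.1.set (i * N + j) (some (-1))
  if pvCell matrix i j then
    if st.2.1 then (arr.set (st.2.2.1 * N + st.2.2.2) (some (j : Int)), true, i, j)
    else (arr, true, i, j)
  else (arr, st.2.1, st.2.2.1, st.2.2.2)

def createNextRightMap (m n : Int) (matrix : List (List Bool)) : List (Option Int) :=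
  (List.range m.toNat).foldl
    (fun arr i => ((List.range n.toNat).foldl (pvRightStep matrix n.toNat i) (arr, false, 0, 0)).1)
    (List.replicate (m.toNat * n.toNat) none)

def pvDownStep (matrix : List (List Bool)) (N j : Nat)
    (st : List (Option Int) × Bool × Nat × Nat) (i : Nat) :
    List (Option Int) × Bool × Nat × Nat :=
  let arr := st.1.set (i * N + j) (some (-1))
  if pvCell matrix i j then
    if st.2.1 then (arr.set (st.2.2.1 * N + st.2.2.2) (some (i : Int)), true, i, j)
    else (arr, true, i, j)
  else (arr, st.2.1, st.2.2.1, st.2.2.2)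

def createNextDownMap (m n : Int) (matrix : List (List Bool)) : List (Option Int) :=
  (List.range n.toNat).foldl
    (fun arr j => ((List.range m.toNat).foldl (pvDownStep matrix n.toNat j) (arr, false, 0, 0)).1)
    (List.replicate (m.toNat * n.toNat) none)

def lemma2Exists (m : Int) (n : Int) (matrix : List (List Bool)) : Bool :=
  let N := n.toNat
  let nextOneRight := createNextRightMap m n matrix
  let nextOneDown := createNextDownMap m n matrix
  (List.range m.toNat).any fun topRow =>
    (List.range N).any fun leftCol =>
      pvCell matrix topRow leftCol &&
      (match nextOneDown.getD (topRow * N + leftCol) none with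
       | none => false
       | some bottomRow =>
         if bottomRow = -1 then false
         else if pvCell matrix bottomRow.toNat leftCol then
           match nextOneRight.getD (bottomRow.toNat * N + leftCol) none with
           | none => false
           | some rightCol =>
             decide (rightCol ≠ -1) && pvCell matrix bottomRow.toNat rightCol.toNat &&
               !(pvCell matrix topRow rightCol.toNat)
         else false)

-- ===== PORT B =====
def lemma2Exists_alt (m : Int) (n : Int) (matrix : List (List Bool)) : Bool :=
  let M := m.toNat
  let N := n.toNat
  (List.range M).any fun topRow =>
    (List.range N).any fun leftCol =>
      pvCell matrix topRow leftCol &&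
      (match (List.range' (topRow + 1) (M - (topRow + 1))).find? (fun i => pvCell matrix i leftCol) with
       | none => false
       | some bottomRow =>
         match (List.range' (leftCol + 1) (N - (leftCol + 1))).find? (fun c => pvCell matrix bottomRow c) with
         | none => false
         | some rightCol => !(pvCell matrix topRow rightCol))

-- ===== PRECONDITION & SPEC =====
-- Pre_ excludes exactly the inputs on which Python A raises IndexError: whenever both loop
-- bounds are positive, the matrix must have at least m rows and each traversed row at least n columns.
def Pre_lemma2Exists (m : Int) (n : Int) (matrix : List (List Bool)) : Prop :=
  0 < m → 0 < n →
    (m.toNat ≤ matrix.length ∧ ∀ row ∈ matrix.take m.toNat, n.toNat ≤ row.length)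
instance (m : Int) (n : Int) (matrix : List (List Bool)) : Decidable (Pre_lemma2Exists m n matrix) := by
  unfold Pre_lemma2Exists; infer_instance
def pvWitness_lemma2Exists : Int × Int × List (List Bool) :=
  (2, 2, [[true, false], [true, true]])
def Spec_lemma2Exists (m : Int) (n : Int) (matrix : List (List Bool)) (out : Bool) : Prop := out = lemma2Exists_alt m n matrix
instance (m : Int) (n : Int) (matrix : List (List Bool)) (out : Bool) : Decidable (Spec_lemma2Exists m n matrix out) := by unfold Spec_lemma2Exists; infer_instance

-- ===== CLAIM (what is proved, stated in full; the proofs are below) =====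
def Claim_equal_lemma2Exists : Prop := ∀ (m : Int) (n : Int) (matrix : List (List Bool)), Dom_lemma2Exists m n matrix → Pre_lemma2Exists m n matrix → Spec_lemma2Exists m n matrix (lemma2Exists m n matrix)

-- ===== LEMMAS AND PROOFS =====

def pvNextIn (c : Nat → Bool) (start stop : Nat) : Int :=
  match (List.range' start (stop - start)).find? c with
  | some b => (b : Int)
  | none => -1

theorem pvEncode_inj {N i j i' j' : Nat} (hj : j < N) (hj' : j' < N)
    (h : i * N + j = i' * N + j') : i = i' ∧ j = j' := by
  have hm : (i * N + j) % N = (i' * N + j') % N := by rw [h]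
  rw [Nat.mul_comm i N, Nat.mul_comm i' N, Nat.mul_add_mod, Nat.mul_add_mod,
    Nat.mod_eq_of_lt hj, Nat.mod_eq_of_lt hj'] at hm
  subst hm
  have h2 : i * N = i' * N := by omega
  have hN : 0 < N := by omega
  exact ⟨Nat.eq_of_mul_eq_mul_right hN h2, rfl⟩

theorem pvNextIn_succ (c : Nat → Bool) (s k : Nat) (h : s ≤ k) :
    pvNextIn c s (k + 1) =
      match (List.range' s (k - s)).find? c with
      | some b => (b : Int)
      | none => if c k then (k : Int) else -1 := by
  unfold pvNextIn
  have h1 : k + 1 - s = (k - s) + 1 := by omega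
  rw [h1, List.range'_concat, List.find?_append]
  have h2 : s + 1 * (k - s) = k := by omega
  simp only [h2]
  cases hf : (List.range' s (k - s)).find? c with
  | none => cases hck : c k <;> simp [hck]
  | some b => simp

theorem pvNextIn_zero (c : Nat → Bool) (s t : Nat) (h : s ≥ t) : pvNextIn c s t = -1 := by
  unfold pvNextIn
  have h1 : t - s = 0 := by omega
  simp [h1]

theorem pvIdxLt {M N i j : Nat} (hi : i < M) (hj : j < N) : i * N + j < M * N := by
  have h1 : (i + 1) * N ≤ M * N := Nat.mul_le_mul_right N hi
  have h2 : (i + 1) * N = i * N + N := by ring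
  omega

theorem pvGet_set_ne {A : Type} (l : List A) (a : A) {i j : Nat} (h : i ≠ j) :
    (l.set i a)[j]? = l[j]? := by
  simp [h]

theorem pvGet_set_self {A : Type} (l : List A) (a : A) {i : Nat} (h : i < l.length) :
    (l.set i a)[i]? = some a := by
  simp [h]

theorem pvDownCol (matrix : List (List Bool)) (M N j : Nat) (hj : j < N)
    (arr0 : List (Option Int)) (hlen : arr0.length = M * N) :
    ∀ k, k ≤ M →
      (((List.range k).foldl (pvDownStep matrix N j) (arr0, false, 0, 0)).1.length = M * N) ∧
      (((List.range k).foldl (pvDownStep matrix N j) (arr0, false, 0, 0)).2.1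
         = (List.range k).any (fun i => pvCell matrix i j)) ∧
      (((List.range k).foldl (pvDownStep matrix N j) (arr0, false, 0, 0)).2.1 = true →
         (((List.range k).foldl (pvDownStep matrix N j) (arr0, false, 0, 0)).2.2.2 = j ∧
          ((List.range k).foldl (pvDownStep matrix N j) (arr0, false, 0, 0)).2.2.1 < k ∧
          pvCell matrix (((List.range k).foldl (pvDownStep matrix N j) (arr0, false, 0, 0)).2.2.1) j = true ∧
          ∀ i, (((List.range k).foldl (pvDownStep matrix N j) (arr0, false, 0, 0)).2.2.1) < i → i < k →
            pvCell matrix i j = false)) ∧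
      (∀ i, i < k →
         (((List.range k).foldl (pvDownStep matrix N j) (arr0, false, 0, 0)).1)[i * N + j]?
           = some (some (if pvCell matrix i j then pvNextIn (fun i' => pvCell matrix i' j) (i + 1) k else -1))) ∧
      (∀ idx, (∀ i, i < k → idx ≠ i * N + j) →
         (((List.range k).foldl (pvDownStep matrix N j) (arr0, false, 0, 0)).1)[idx]? = arr0[idx]?) := by
  intro k
  induction k with
  | zero => intro _; simp [hlen]
  | succ k ih =>
    intro hk1
    have hk : k ≤ M := by omega
    have hkM : k < M := by omega
    obtain ⟨ihlen, ihfound, ihprev, ihval, ihkeep⟩ := ih hk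
    rw [List.range_succ, List.foldl_append, List.foldl_cons, List.foldl_nil]
    set st := (List.range k).foldl (pvDownStep matrix N j) (arr0, false, 0, 0) with hst
    simp only [pvDownStep]
    cases hc : pvCell matrix k j with
    | false =>
      simp only [Bool.false_eq_true, if_false]
      refine ⟨by simp [ihlen], by simp [List.any_append, hc, ihfound], ?_, ?_, ?_⟩
      · intro hf
        obtain ⟨hpc, hpr, hcp, hmax⟩ := ihprev hf
        refine ⟨hpc, by omega, hcp, fun i h1 h2 => ?_⟩
        rcases Nat.lt_or_ge i k with h3 | h3
        · exact hmax i h1 h3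
        · have : i = k := by omega
          subst this; exact hc
      · intro i hi
        rcases Nat.lt_or_ge i k with hik | hik
        · have hne : k * N + j ≠ i * N + j := fun h =>
            absurd (pvEncode_inj hj hj h).1 (by omega)
          rw [pvGet_set_ne _ _ hne, ihval i hik]
          by_cases hci : pvCell matrix i j = true
          · simp only [hci, if_true]
            have := pvNextIn_succ (fun i' => pvCell matrix i' j) (i + 1) k (by omega)
            rw [this]
            unfold pvNextIn
            cases hfind : (List.range' (i + 1) (k - (i + 1))).find? (fun i' => pvCell matrix i' j) with
            | some b => simp
            | none => simp [hc]
          · simp only [Bool.not_eq_true] at hci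
            simp [hci]
        · have : i = k := by omega
          subst this
          rw [pvGet_set_self _ _ (by rw [ihlen]; exact pvIdxLt hkM hj)]
          simp [hc]
      · intro idx hidx
        have h1 : k * N + j ≠ idx := fun h => (hidx k (by omega)) h.symm
        rw [pvGet_set_ne _ _ h1]
        exact ihkeep idx (fun i hi => hidx i (by omega))
    | true =>
      rw [if_pos rfl]
      cases hfnd : st.2.1 with
      | false =>
        rw [if_neg (show ¬(false = true) by simp)]
        have hall : ∀ i, i < k → pvCell matrix i j = false := by
          intro i hi
          have h0 : (List.range k).any (fun i => pvCell matrix i j) = false := by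
            rw [← ihfound]; exact hfnd
          simpa using List.any_eq_false.mp h0 i (List.mem_range.mpr hi)
        refine ⟨by simp [ihlen], by simp [List.any_append, hc], ?_, ?_, ?_⟩
        · intro _
          exact ⟨rfl, Nat.lt_succ_self k, hc, fun i h1 h2 => absurd (show k < i from h1) (by omega)⟩
        · intro i hi
          rcases Nat.lt_or_ge i k with hik | hik
          · have hne : k * N + j ≠ i * N + j := fun h =>
              absurd (pvEncode_inj hj hj h).1 (by omega)
            rw [pvGet_set_ne _ _ hne, ihval i hik]
            simp [hall i hik]
          · have h2 : i = k := by omega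
            subst h2
            rw [pvGet_set_self _ _ (by rw [ihlen]; exact pvIdxLt hkM hj)]
            simp [hc, pvNextIn_zero (fun i' => pvCell matrix i' j) (i + 1) (i + 1) (Nat.le_refl _)]
        · intro idx hidx
          have h1 : k * N + j ≠ idx := fun h => (hidx k (by omega)) h.symm
          rw [pvGet_set_ne _ _ h1]
          exact ihkeep idx (fun i hi => hidx i (by omega))
      | true =>
        rw [if_pos rfl]
        obtain ⟨hpc, hpr, hcp, hmax⟩ := ihprev hfnd
        rw [hpc]
        refine ⟨by simp [ihlen], by simp [List.any_append, hc], ?_, ?_, ?_⟩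
        · intro _
          exact ⟨rfl, Nat.lt_succ_self k, hc, fun i h1 h2 => absurd (show k < i from h1) (by omega)⟩
        · intro i hi
          rcases Nat.lt_or_ge i k with hik | hik
          · by_cases hipr : i = st.2.2.1
            · subst hipr
              rw [pvGet_set_self _ _ (by rw [List.length_set, ihlen]; exact pvIdxLt (by omega) hj)]
              simp only [hcp, if_true]
              rw [pvNextIn_succ _ _ _ (by omega)]
              have hnone : (List.range' (st.2.2.1 + 1) (k - (st.2.2.1 + 1))).find?
                  (fun i' => pvCell matrix i' j) = none := by
                apply List.find?_eq_none.mpr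
                intro x hx
                have hx2 := List.mem_range'_1.mp hx
                simp [hmax x (by omega) (by omega)]
              rw [hnone]
              simp [hc]
            · have hne1 : st.2.2.1 * N + j ≠ i * N + j := fun h =>
                absurd (pvEncode_inj hj hj h).1 (fun h2 => hipr h2.symm)
              have hne2 : k * N + j ≠ i * N + j := fun h =>
                absurd (pvEncode_inj hj hj h).1 (by omega)
              rw [pvGet_set_ne _ _ hne1, pvGet_set_ne _ _ hne2, ihval i hik]
              by_cases hci : pvCell matrix i j = true
              · simp only [hci, if_true]
                have hipr' : i < st.2.2.1 := by
                  rcases Nat.lt_or_ge i st.2.2.1 with h | h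
                  · exact h
                  · exfalso
                    have h3 := hmax i (by omega) hik
                    simp [h3] at hci
                rw [pvNextIn_succ _ _ _ (by omega)]
                unfold pvNextIn
                cases hfind : (List.range' (i + 1) (k - (i + 1))).find? (fun i' => pvCell matrix i' j) with
                | some b => simp
                | none =>
                  exfalso
                  have hmem : st.2.2.1 ∈ List.range' (i + 1) (k - (i + 1)) :=
                    List.mem_range'_1.mpr ⟨by omega, by omega⟩
                  have h4 := List.find?_eq_none.mp hfind _ hmem
                  simp [hcp] at h4
              · simp only [Bool.not_eq_true] at hci
                simp [hci]
          · have h2 : i = k := by omega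
            subst h2
            have hne : st.2.2.1 * N + j ≠ i * N + j := fun h =>
              absurd (pvEncode_inj hj hj h).1 (by omega)
            rw [pvGet_set_ne _ _ hne, pvGet_set_self _ _ (by rw [ihlen]; exact pvIdxLt hkM hj)]
            simp [hc, pvNextIn_zero (fun i' => pvCell matrix i' j) (i + 1) (i + 1) (Nat.le_refl _)]
        · intro idx hidx
          have h1 : st.2.2.1 * N + j ≠ idx := fun h => (hidx st.2.2.1 (by omega)) h.symm
          have h2 : k * N + j ≠ idx := fun h => (hidx k (by omega)) h.symm
          rw [pvGet_set_ne _ _ h1, pvGet_set_ne _ _ h2]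
          exact ihkeep idx (fun i hi => hidx i (by omega))

theorem pvRightRow (matrix : List (List Bool)) (M N i : Nat) (hi : i < M)
    (arr0 : List (Option Int)) (hlen : arr0.length = M * N) :
    ∀ k, k ≤ N →
      (((List.range k).foldl (pvRightStep matrix N i) (arr0, false, 0, 0)).1.length = M * N) ∧
      (((List.range k).foldl (pvRightStep matrix N i) (arr0, false, 0, 0)).2.1
         = (List.range k).any (fun j => pvCell matrix i j)) ∧
      (((List.range k).foldl (pvRightStep matrix N i) (arr0, false, 0, 0)).2.1 = true →
         (((List.range k).foldl (pvRightStep matrix N i) (arr0, false, 0, 0)).2.2.1 = i ∧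
          ((List.range k).foldl (pvRightStep matrix N i) (arr0, false, 0, 0)).2.2.2 < k ∧
          pvCell matrix i (((List.range k).foldl (pvRightStep matrix N i) (arr0, false, 0, 0)).2.2.2) = true ∧
          ∀ j', (((List.range k).foldl (pvRightStep matrix N i) (arr0, false, 0, 0)).2.2.2) < j' → j' < k →
            pvCell matrix i j' = false)) ∧
      (∀ j', j' < k →
         (((List.range k).foldl (pvRightStep matrix N i) (arr0, false, 0, 0)).1)[i * N + j']?
           = some (some (if pvCell matrix i j' then pvNextIn (fun j'' => pvCell matrix i j'') (j' + 1) k else -1))) ∧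
      (∀ idx, (∀ j', j' < N → idx ≠ i * N + j') →
         (((List.range k).foldl (pvRightStep matrix N i) (arr0, false, 0, 0)).1)[idx]? = arr0[idx]?) := by
  intro k
  induction k with
  | zero => intro _; simp [hlen]
  | succ k ih =>
    intro hk1
    have hk : k ≤ N := by omega
    have hkN : k < N := by omega
    obtain ⟨ihlen, ihfound, ihprev, ihval, ihkeep⟩ := ih hk
    rw [List.range_succ, List.foldl_append, List.foldl_cons, List.foldl_nil]
    set st := (List.range k).foldl (pvRightStep matrix N i) (arr0, false, 0, 0) with hst
    simp only [pvRightStep]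
    cases hc : pvCell matrix i k with
    | false =>
      simp only [Bool.false_eq_true, if_false]
      refine ⟨by simp [ihlen], by simp [List.any_append, hc, ihfound], ?_, ?_, ?_⟩
      · intro hf
        obtain ⟨hpr, hpc, hcp, hmax⟩ := ihprev hf
        refine ⟨hpr, by omega, hcp, fun j' h1 h2 => ?_⟩
        rcases Nat.lt_or_ge j' k with h3 | h3
        · exact hmax j' h1 h3
        · have h4 : j' = k := by omega
          subst h4; exact hc
      · intro j' hjk
        rcases Nat.lt_or_ge j' k with hik | hik
        · have hne : i * N + k ≠ i * N + j' := by omega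
          rw [pvGet_set_ne _ _ hne, ihval j' hik]
          by_cases hci : pvCell matrix i j' = true
          · simp only [hci, if_true]
            have h5 := pvNextIn_succ (fun j'' => pvCell matrix i j'') (j' + 1) k (by omega)
            rw [h5]
            unfold pvNextIn
            cases hfind : (List.range' (j' + 1) (k - (j' + 1))).find? (fun j'' => pvCell matrix i j'') with
            | some b => simp
            | none => simp [hc]
          · simp only [Bool.not_eq_true] at hci
            simp [hci]
        · have h2 : j' = k := by omega
          subst h2
          rw [pvGet_set_self _ _ (by rw [ihlen]; exact pvIdxLt hi hkN)]
          simp [hc]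
      · intro idx hidx
        have h1 : i * N + k ≠ idx := fun h => (hidx k hkN) h.symm
        rw [pvGet_set_ne _ _ h1]
        exact ihkeep idx hidx
    | true =>
      rw [if_pos rfl]
      cases hfnd : st.2.1 with
      | false =>
        rw [if_neg (show ¬(false = true) by simp)]
        have hall : ∀ j', j' < k → pvCell matrix i j' = false := by
          intro j' hjk
          have h0 : (List.range k).any (fun j'' => pvCell matrix i j'') = false := by
            rw [← ihfound]; exact hfnd
          simpa using List.any_eq_false.mp h0 j' (List.mem_range.mpr hjk)
        refine ⟨by simp [ihlen], by simp [List.any_append, hc], ?_, ?_, ?_⟩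
        · intro _
          exact ⟨rfl, Nat.lt_succ_self k, hc, fun j' h1 h2 => absurd (show k < j' from h1) (by omega)⟩
        · intro j' hjk
          rcases Nat.lt_or_ge j' k with hik | hik
          · have hne : i * N + k ≠ i * N + j' := by omega
            rw [pvGet_set_ne _ _ hne, ihval j' hik]
            simp [hall j' hik]
          · have h2 : j' = k := by omega
            subst h2
            rw [pvGet_set_self _ _ (by rw [ihlen]; exact pvIdxLt hi hkN)]
            simp [hc, pvNextIn_zero (fun j'' => pvCell matrix i j'') (j' + 1) (j' + 1) (Nat.le_refl _)]
        · intro idx hidx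
          have h1 : i * N + k ≠ idx := fun h => (hidx k hkN) h.symm
          rw [pvGet_set_ne _ _ h1]
          exact ihkeep idx hidx
      | true =>
        rw [if_pos rfl]
        obtain ⟨hpr, hpc, hcp, hmax⟩ := ihprev hfnd
        rw [hpr]
        refine ⟨by simp [ihlen], by simp [List.any_append, hc], ?_, ?_, ?_⟩
        · intro _
          exact ⟨rfl, Nat.lt_succ_self k, hc, fun j' h1 h2 => absurd (show k < j' from h1) (by omega)⟩
        · intro j' hjk
          rcases Nat.lt_or_ge j' k with hik | hik
          · by_cases hipr : j' = st.2.2.2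
            · subst hipr
              rw [pvGet_set_self _ _ (by rw [List.length_set, ihlen]; exact pvIdxLt hi (by omega))]
              simp only [hcp, if_true]
              rw [pvNextIn_succ _ _ _ (by omega)]
              have hnone : (List.range' (st.2.2.2 + 1) (k - (st.2.2.2 + 1))).find?
                  (fun j'' => pvCell matrix i j'') = none := by
                apply List.find?_eq_none.mpr
                intro x hx
                have hx2 := List.mem_range'_1.mp hx
                simp [hmax x (by omega) (by omega)]
              rw [hnone]
              simp [hc]
            · have hne1 : i * N + st.2.2.2 ≠ i * N + j' := by omega
              have hne2 : i * N + k ≠ i * N + j' := by omega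
              rw [pvGet_set_ne _ _ hne1, pvGet_set_ne _ _ hne2, ihval j' hik]
              by_cases hci : pvCell matrix i j' = true
              · simp only [hci, if_true]
                have hipr' : j' < st.2.2.2 := by
                  rcases Nat.lt_or_ge j' st.2.2.2 with h | h
                  · exact h
                  · exfalso
                    have h3 := hmax j' (by omega) hik
                    simp [h3] at hci
                rw [pvNextIn_succ _ _ _ (by omega)]
                unfold pvNextIn
                cases hfind : (List.range' (j' + 1) (k - (j' + 1))).find? (fun j'' => pvCell matrix i j'') with
                | some b => simp
                | none =>
                  exfalso
                  have hmem : st.2.2.2 ∈ List.range' (j' + 1) (k - (j' + 1)) :=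
                    List.mem_range'_1.mpr ⟨by omega, by omega⟩
                  have h4 := List.find?_eq_none.mp hfind _ hmem
                  simp [hcp] at h4
              · simp only [Bool.not_eq_true] at hci
                simp [hci]
          · have h2 : j' = k := by omega
            subst h2
            have hne : i * N + st.2.2.2 ≠ i * N + j' := by omega
            rw [pvGet_set_ne _ _ hne, pvGet_set_self _ _ (by rw [ihlen]; exact pvIdxLt hi (by omega))]
            simp [hc, pvNextIn_zero (fun j'' => pvCell matrix i j'') (j' + 1) (j' + 1) (Nat.le_refl _)]
        · intro idx hidx
          have h1 : i * N + st.2.2.2 ≠ idx := fun h => (hidx st.2.2.2 (by omega)) h.symm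
          have h2 : i * N + k ≠ idx := fun h => (hidx k hkN) h.symm
          rw [pvGet_set_ne _ _ h1, pvGet_set_ne _ _ h2]
          exact ihkeep idx hidx

theorem pvDownFold (matrix : List (List Bool)) (M N : Nat) :
    ∀ t, t ≤ N →
      (((List.range t).foldl (fun arr j => ((List.range M).foldl (pvDownStep matrix N j) (arr, false, 0, 0)).1)
          (List.replicate (M * N) (none : Option Int))).length = M * N) ∧
      (∀ i j, i < M → j < t →
        ((List.range t).foldl (fun arr j => ((List.range M).foldl (pvDownStep matrix N j) (arr, false, 0, 0)).1)
          (List.replicate (M * N) (none : Option Int)))[i * N + j]?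
        = some (some (if pvCell matrix i j then pvNextIn (fun i' => pvCell matrix i' j) (i + 1) M else -1))) := by
  intro t
  induction t with
  | zero => intro _; simp
  | succ t ih =>
    intro ht1
    have htN : t < N := by omega
    obtain ⟨ihlen, ihval⟩ := ih (by omega)
    rw [List.range_succ, List.foldl_append, List.foldl_cons, List.foldl_nil]
    obtain ⟨clen, -, -, cval, ckeep⟩ :=
      pvDownCol matrix M N t htN
        ((List.range t).foldl (fun arr j => ((List.range M).foldl (pvDownStep matrix N j) (arr, false, 0, 0)).1)
          (List.replicate (M * N) (none : Option Int))) ihlen M (Nat.le_refl M)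
    refine ⟨clen, ?_⟩
    intro i j hiM hjt
    rcases Nat.lt_or_ge j t with hj | hj
    · rw [ckeep (i * N + j) (fun i' hi' h => absurd (pvEncode_inj (by omega) htN h).2 (by omega))]
      exact ihval i j hiM hj
    · have h2 : j = t := by omega
      subst h2
      exact cval i hiM

theorem pvRightFold (matrix : List (List Bool)) (M N : Nat) :
    ∀ t, t ≤ M →
      (((List.range t).foldl (fun arr i => ((List.range N).foldl (pvRightStep matrix N i) (arr, false, 0, 0)).1)
          (List.replicate (M * N) (none : Option Int))).length = M * N) ∧
      (∀ i j, i < t → j < N →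
        ((List.range t).foldl (fun arr i => ((List.range N).foldl (pvRightStep matrix N i) (arr, false, 0, 0)).1)
          (List.replicate (M * N) (none : Option Int)))[i * N + j]?
        = some (some (if pvCell matrix i j then pvNextIn (fun j' => pvCell matrix i j') (j + 1) N else -1))) := by
  intro t
  induction t with
  | zero => intro _; simp
  | succ t ih =>
    intro ht1
    have htM : t < M := by omega
    obtain ⟨ihlen, ihval⟩ := ih (by omega)
    rw [List.range_succ, List.foldl_append, List.foldl_cons, List.foldl_nil]
    obtain ⟨clen, -, -, cval, ckeep⟩ :=
      pvRightRow matrix M N t htM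
        ((List.range t).foldl (fun arr i => ((List.range N).foldl (pvRightStep matrix N i) (arr, false, 0, 0)).1)
          (List.replicate (M * N) (none : Option Int))) ihlen N (Nat.le_refl N)
    refine ⟨clen, ?_⟩
    intro i j hit hjN
    rcases Nat.lt_or_ge i t with hi | hi
    · rw [ckeep (i * N + j) (fun j' hj' h => absurd (pvEncode_inj hjN hj' h).1 (by omega))]
      exact ihval i j hi hjN
    · have h2 : i = t := by omega
      subst h2
      exact cval j hjN

theorem pvDownMap_spec (m n : Int) (matrix : List (List Bool)) (i j : Nat)
    (hi : i < m.toNat) (hj : j < n.toNat) :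
    (createNextDownMap m n matrix)[i * n.toNat + j]?
      = some (some (if pvCell matrix i j then pvNextIn (fun i' => pvCell matrix i' j) (i + 1) m.toNat else -1)) := by
  exact (pvDownFold matrix m.toNat n.toNat n.toNat (Nat.le_refl _)).2 i j hi hj

theorem pvRightMap_spec (m n : Int) (matrix : List (List Bool)) (i j : Nat)
    (hi : i < m.toNat) (hj : j < n.toNat) :
    (createNextRightMap m n matrix)[i * n.toNat + j]?
      = some (some (if pvCell matrix i j then pvNextIn (fun j' => pvCell matrix i j') (j + 1) n.toNat else -1)) := by
  exact (pvRightFold matrix m.toNat n.toNat m.toNat (Nat.le_refl _)).2 i j hi hj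

theorem pvAny_congr {l : List Nat} {p q : Nat → Bool} (h : ∀ x ∈ l, p x = q x) :
    l.any p = l.any q := by
  induction l with
  | nil => rfl
  | cons a l ih =>
    simp only [List.any_cons, h a (List.mem_cons_self),
      ih fun x hx => h x (List.mem_cons_of_mem a hx)]

theorem pvMain (m n : Int) (matrix : List (List Bool)) :
    lemma2Exists m n matrix = lemma2Exists_alt m n matrix := by
  unfold lemma2Exists lemma2Exists_alt
  apply pvAny_congr
  intro topRow htr
  apply pvAny_congr
  intro leftCol hlc
  rw [List.mem_range] at htr hlc
  cases hcell : pvCell matrix topRow leftCol with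
  | false => simp
  | true =>
    simp only [Bool.true_and]
    rw [List.getD_eq_getElem?_getD, pvDownMap_spec m n matrix topRow leftCol htr hlc]
    simp only [hcell, if_true, Option.getD_some]
    unfold pvNextIn
    cases hfind : (List.range' (topRow + 1) (m.toNat - (topRow + 1))).find? (fun i => pvCell matrix i leftCol) with
    | none => simp
    | some b =>
      have hbmem := List.mem_range'_1.mp (List.mem_of_find?_eq_some hfind)
      have hbM : b < m.toNat := by omega
      have hb2 : pvCell matrix b leftCol = true := by simpa using List.find?_some hfind
      rw [if_neg (show ¬((b : Int) = -1) by omega), Int.toNat_natCast, hb2]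
      simp only [if_true]
      rw [List.getD_eq_getElem?_getD, pvRightMap_spec m n matrix b leftCol hbM hlc]
      simp only [hb2, if_true, Option.getD_some]
      unfold pvNextIn
      cases hfind2 : (List.range' (leftCol + 1) (n.toNat - (leftCol + 1))).find? (fun c => pvCell matrix b c) with
      | none => simp
      | some r =>
        have hrmem := List.mem_range'_1.mp (List.mem_of_find?_eq_some hfind2)
        have hr2 : pvCell matrix b r = true := by simpa using List.find?_some hfind2
        rw [Int.toNat_natCast, hr2]
        simp [show ((r : Int) ≠ -1) from by omega]

-- ===== VERDICT (by name: the statement is the Claim_ definition above) =====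
theorem lemma2Exists_spec : Claim_equal_lemma2Exists := by
  intro m n matrix _ _
  unfold Spec_lemma2Exists
  exact pvMain m n matrix
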